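-- pv_equiv track=rewrite | github.com/Dalbizurez/ejercicios-lab | 2do Parcial/zodiaco_chino.py | zodiaco
-- ===== SOURCE A (Python) =====
-- def zodiaco(year):
--     signo = ""
--     elemento = ""
--     year = year%1900
--     match year%10:
--         case 4 | 5:
--             elemento = "madera"
--         case 6|7:
--             elemento = "fuego"
--         case 8|9:
--             elemento = "tierra"
--         case 0|1:
--             elemento = "metal"
--         case 2|3:
--             elemento = "agua"
--
-- # Quiza tambien puedo hacerlo con mod, pero ya lo hice asi, si me da tiempo pruebo
--     while year >= 36:
--         year -= 12
--     match year:
--         case 24: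
--             signo = "rata"
--         case 25:
--             signo = "buey"
--         case 26:
--             signo = "tigre"
--         case 27:
--             signo = "conejo"
--         case 28:
--             signo = "dragon"
--         case 29:
--             signo = "serpiente"
--         case 30:
--             signo = "caballo"
--         case 31:
--             signo = "oveja"
--         case 32:
--             signo = "mono"
--         case 33:
--             signo = "gallo"
--         case 34:
--             signo = "perro"
--         case 35:
--             signo = "cerdo"
--     return signo, elemento
-- ===== SOURCE B (Python) =====
-- SIGNS = {24: "rata", 25: "buey", 26: "tigre", 27: "conejo", 28: "dragon",
--          29: "serpiente", 30: "caballo", 31: "oveja", 32: "mono",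
--          33: "gallo", 34: "perro", 35: "cerdo"}
-- ELEMENTS = ("metal", "agua", "madera", "fuego", "tierra")
--
-- def zodiaco(year):
--     v = year % 1900
--     reduced = v if v < 36 else 24 + (v - 24) % 12
--     return SIGNS.get(reduced, ""), ELEMENTS[(v % 10) // 2]
-- ===== Notes on version B (the rewrite author's own statement) =====
-- stated objective: simpler
-- what changed: Replaces the repeated-subtraction while loop and the two long match statements with a closed-form modular reduction, a dict lookup for the sign and direct list indexing for the element.
import Mathlib
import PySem

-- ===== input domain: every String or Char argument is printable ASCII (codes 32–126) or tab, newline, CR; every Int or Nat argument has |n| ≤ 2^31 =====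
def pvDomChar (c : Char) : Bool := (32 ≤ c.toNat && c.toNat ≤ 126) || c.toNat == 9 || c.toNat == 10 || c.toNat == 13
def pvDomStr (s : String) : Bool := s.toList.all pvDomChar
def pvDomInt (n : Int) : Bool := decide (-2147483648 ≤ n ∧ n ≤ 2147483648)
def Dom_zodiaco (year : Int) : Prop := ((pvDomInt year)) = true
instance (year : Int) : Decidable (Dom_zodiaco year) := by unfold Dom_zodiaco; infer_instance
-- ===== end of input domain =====

-- B replaces A's subtract-12 while loop and the two match statements by a closed-form
-- modular reduction, a dict lookup (sign) and direct list indexing (element); simpler, same values.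

-- ===== PORT A =====
-- the 'while year >= 36: year -= 12' loop
def zodLoopA (y : Int) : Int :=
  if y ≥ 36 then zodLoopA (y - 12) else y
termination_by y.toNat
decreasing_by omega

def zodiaco (year : Int) : String × String :=
  let y := PySem.Int.mod year 1900
  let m := PySem.Int.mod y 10
  -- 'match year%10' transliterated as an if-chain in the same case order
  let elemento :=
    if m = 4 ∨ m = 5 then "madera"
    else if m = 6 ∨ m = 7 then "fuego"
    else if m = 8 ∨ m = 9 then "tierra"
    else if m = 0 ∨ m = 1 then "metal"
    else if m = 2 ∨ m = 3 then "agua"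
    else ""                                    -- unreachable: no case matches ⇒ elemento stays ""
  let y2 := zodLoopA y
  -- 'match year' transliterated as an if-chain in the same case order
  let signo :=
    if y2 = 24 then "rata"
    else if y2 = 25 then "buey"
    else if y2 = 26 then "tigre"
    else if y2 = 27 then "conejo"
    else if y2 = 28 then "dragon"
    else if y2 = 29 then "serpiente"
    else if y2 = 30 then "caballo"
    else if y2 = 31 then "oveja"
    else if y2 = 32 then "mono"
    else if y2 = 33 then "gallo"
    else if y2 = 34 then "perro"
    else if y2 = 35 then "cerdo"
    else ""                                    -- no case matches ⇒ signo stays ""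
  (signo, elemento)

-- ===== PORT B =====
def zodSigns : PySem.Dict Int String :=
  PySem.Dict.ofList
    [(24, "rata"), (25, "buey"), (26, "tigre"), (27, "conejo"), (28, "dragon"),
     (29, "serpiente"), (30, "caballo"), (31, "oveja"), (32, "mono"),
     (33, "gallo"), (34, "perro"), (35, "cerdo")]

def zodElements : List String := ["metal", "agua", "madera", "fuego", "tierra"]

def zodiaco_alt (year : Int) : String × String :=
  let v := PySem.Int.mod year 1900
  let reduced := if v < 36 then v else 24 + PySem.Int.mod (v - 24) 12
  (PySem.Dict.getD zodSigns reduced "",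
   -- ELEMENTS[(v % 10) // 2]: the index is always in 0..4, so the tuple indexing never raises
   (PySem.List.pyGet? zodElements (PySem.Int.floordiv (PySem.Int.mod v 10) 2)).getD "")

-- ===== PRECONDITION & SPEC =====
def Spec_zodiaco (year : Int) (out : String × String) : Prop := out = zodiaco_alt year
instance (year : Int) (out : String × String) : Decidable (Spec_zodiaco year out) := by unfold Spec_zodiaco; infer_instance

-- ===== CLAIM (what is proved, stated in full; the proofs are below) =====
def Claim_equal_zodiaco : Prop := ∀ (year : Int), Dom_zodiaco year → Spec_zodiaco year (zodiaco year)

-- ===== LEMMAS AND PROOFS =====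

-- A's while loop computes B's closed form
theorem zodLoopA_eq (y : Int) (h0 : 0 ≤ y) :
    zodLoopA y = if y < 36 then y else 24 + PySem.Int.mod (y - 24) 12 := by
  have hm : ∀ a : Int, PySem.Int.mod a 12 = a % 12 :=
    fun a => PySem.Int.mod_eq_emod_of_pos (by norm_num)
  induction y using zodLoopA.induct with
  | case1 y hge ih =>
    rw [zodLoopA, if_pos hge, ih (by omega)]
    rw [hm, hm]
    split_ifs <;> omega
  | case2 y hlt =>
    rw [zodLoopA, if_neg hlt, if_pos (by omega)]

-- ===== VERDICT (by name: the statement is the Claim_ definition above) =====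
theorem zodiaco_spec : Claim_equal_zodiaco := by
  intro year _
  unfold Spec_zodiaco zodiaco zodiaco_alt
  simp only []
  set v := PySem.Int.mod year 1900 with hv
  have hv0 : 0 ≤ v := PySem.Int.mod_nonneg year (by norm_num)
  have hv1 : v < 1900 := PySem.Int.mod_lt year (by norm_num)
  rw [zodLoopA_eq v hv0]
  -- reduce the sign argument to a bounded variable r
  obtain ⟨r, hr⟩ : ∃ r, (if v < 36 then v else 24 + PySem.Int.mod (v - 24) 12) = r := ⟨_, rfl⟩
  have hr0 : 0 ≤ r := by
    rw [← hr]; split_ifs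
    · exact hv0
    · have := PySem.Int.mod_nonneg (v - 24) (by norm_num : (0:Int) < 12); omega
  have hr1 : r < 36 := by
    rw [← hr]; split_ifs with h
    · exact h
    · have := PySem.Int.mod_lt (v - 24) (by norm_num : (0:Int) < 12); omega
  rw [hr]
  -- reduce the element argument to a bounded variable m
  obtain ⟨m, hmv⟩ : ∃ m, PySem.Int.mod v 10 = m := ⟨_, rfl⟩
  have hm0 : 0 ≤ m := hmv ▸ PySem.Int.mod_nonneg v (by norm_num)
  have hm1 : m < 10 := hmv ▸ PySem.Int.mod_lt v (by norm_num)
  rw [hmv]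
  clear hr hmv hv hv0 hv1
  rw [Prod.mk.injEq]
  refine ⟨?_, ?_⟩
  · interval_cases r <;> decide
  · interval_cases m <;> decide
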